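-- pv_equiv track=rewrite | github.com/zhengwenze/CareerPilot | apps/backend/app/services/resume_markdown_parser.py | _split_resume_markdown
-- ===== SOURCE A (Python) =====
-- def _split_resume_markdown(lines: list[str]) -> tuple[str, list[str], list[str]]:
--     name = ""
--     intro_lines: list[str] = []
--     section_start = len(lines)
--     for index, raw_line in enumerate(lines):
--         line = raw_line.strip()
--         if not line:
--             continue
--         if line.startswith("# ") and not name:
--             name = line.removeprefix("# ").strip()
--             continue
--         if line.startswith("## "):
--             section_start = index
--             break
--         intro_lines.append(line)
--     return name, intro_lines, lines[section_start:]
-- ===== SOURCE B (Python) =====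
-- def _split_resume_markdown(lines: list[str]) -> tuple[str, list[str], list[str]]:
--     section_start = next(
--         (i for i, raw in enumerate(lines) if raw.strip().startswith("## ")),
--         len(lines),
--     )
--     name = ""
--     intro_lines: list[str] = []
--     for raw in lines[:section_start]:
--         line = raw.strip()
--         if not line:
--             continue
--         if not name and line.startswith("# "):
--             name = line.removeprefix("# ").strip()
--         else:
--             intro_lines.append(line)
--     return name, intro_lines, lines[section_start:]
-- ===== Notes on version B (the rewrite author's own statement) =====
-- stated objective: alternative
-- what changed: B first locates the section boundary (first stripped line starting with '## ') in one scan, then parses name/intro in a separate scan over the prefix, instead of A's single interleaved loop with a break.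
import Mathlib
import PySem

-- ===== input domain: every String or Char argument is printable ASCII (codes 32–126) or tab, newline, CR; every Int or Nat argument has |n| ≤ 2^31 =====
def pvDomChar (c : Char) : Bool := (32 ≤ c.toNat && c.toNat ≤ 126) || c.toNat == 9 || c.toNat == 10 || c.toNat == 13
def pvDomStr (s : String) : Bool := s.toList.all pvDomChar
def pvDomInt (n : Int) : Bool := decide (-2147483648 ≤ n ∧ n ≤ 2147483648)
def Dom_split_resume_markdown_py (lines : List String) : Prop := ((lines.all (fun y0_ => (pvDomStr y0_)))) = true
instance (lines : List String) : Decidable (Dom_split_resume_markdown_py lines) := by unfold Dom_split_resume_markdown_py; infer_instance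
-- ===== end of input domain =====

-- B separates boundary-finding from preamble-parsing into two scans instead of A's single interleaved break-loop (alternative decomposition, same cost).

-- ===== PORT A =====
-- str.removeprefix(p): drop p if it is a prefix, else unchanged (exact Python semantics)
def pyRemoveprefix (s p : String) : String :=
  if PySem.Str.startswith s p then String.ofList (s.toList.drop p.toList.length) else s

-- A's for-loop over enumerate(lines) with break: returns (name, intro_lines, section_start)
def aGo (items : List (Int × String)) (name : String) (intro : List String) (secStart : Int) :
    String × List String × Int :=
  match items with
  | [] => (name, intro, secStart)
  | (i, raw) :: rest =>
    let line := PySem.Str.strip raw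
    if line = "" then aGo rest name intro secStart
    else if PySem.Str.startswith line "# " && name == "" then
      aGo rest (PySem.Str.strip (pyRemoveprefix line "# ")) intro secStart
    else if PySem.Str.startswith line "## " then (name, intro, i)
    else aGo rest name (intro ++ [line]) secStart

def split_resume_markdown_py (lines : List String) : String × List String × List String :=
  match aGo (PySem.List.enumerate lines 0) "" [] (lines.length : Int) with
  | (name, intro, secStart) => (name, intro, PySem.List.slice lines (some secStart) none)

-- ===== PORT B =====
-- next((i for i, raw in enumerate(lines) if raw.strip().startswith("## ")), default)
def bFind (items : List (Int × String)) (dflt : Int) : Int :=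
  match items with
  | [] => dflt
  | (i, raw) :: rest =>
    if PySem.Str.startswith (PySem.Str.strip raw) "## " then i else bFind rest dflt

-- B's second loop, over lines[:section_start]
def bLoop (rest : List String) (name : String) (intro : List String) : String × List String :=
  match rest with
  | [] => (name, intro)
  | raw :: t =>
    let line := PySem.Str.strip raw
    if line = "" then bLoop t name intro
    else if name == "" && PySem.Str.startswith line "# " then
      bLoop t (PySem.Str.strip (pyRemoveprefix line "# ")) intro
    else bLoop t name (intro ++ [line])

def split_resume_markdown_py_alt (lines : List String) : String × List String × List String :=
  let secStart := bFind (PySem.List.enumerate lines 0) (lines.length : Int)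
  match bLoop (PySem.List.slice lines none (some secStart)) "" [] with
  | (name, intro) => (name, intro, PySem.List.slice lines (some secStart) none)

-- ===== PRECONDITION & SPEC =====
def Spec_split_resume_markdown_py (lines : List String) (out : String × List String × List String) : Prop := out = split_resume_markdown_py_alt lines
instance (lines : List String) (out : String × List String × List String) : Decidable (Spec_split_resume_markdown_py lines out) := by unfold Spec_split_resume_markdown_py; infer_instance

-- ===== CLAIM (what is proved, stated in full; the proofs are below) =====
def Claim_equal_split_resume_markdown_py : Prop := ∀ (lines : List String), Dom_split_resume_markdown_py lines → Spec_split_resume_markdown_py lines (split_resume_markdown_py lines)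

-- ===== LEMMAS AND PROOFS =====

-- index (as findIdx; = length if absent) of the first line whose stripped form starts with "## "
def fi (xs : List String) : Nat :=
  xs.findIdx (fun raw => PySem.Str.startswith (PySem.Str.strip raw) "## ")

theorem fi_le (xs : List String) : fi xs ≤ xs.length := List.findIdx_le_length

-- a string starting with "## " does not start with "# "
theorem hh_not_h {l : List Char} (h : PySem.Chars.startswith l ['#','#',' '] = true) :
    PySem.Chars.startswith l ['#',' '] = false := by
  cases hx : PySem.Chars.startswith l ['#',' '] with
  | false => rfl
  | true =>
    exfalso
    obtain ⟨t, ht⟩ := (PySem.Chars.startswith_iff _ _).mp h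
    obtain ⟨u, hu⟩ := (PySem.Chars.startswith_iff _ _).mp hx
    rw [← ht] at hu
    simp at hu

theorem bFind_eq (xs : List String) (k d : Int) :
    bFind (PySem.List.enumerate xs k) d =
      if fi xs < xs.length then k + (fi xs : Int) else d := by
  induction xs generalizing k with
  | nil => simp [bFind, PySem.List.enumerate_nil, fi]
  | cons x t ih =>
    rw [PySem.List.enumerate_cons]
    by_cases hpc : PySem.Chars.startswith (PySem.Chars.strip x.toList) ['#','#',' '] = true
    · have hfi0 : fi (x :: t) = 0 := by simp [fi, List.findIdx_cons, hpc]
      simp [bFind, hpc, hfi0]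
    · have hpc' : PySem.Chars.startswith (PySem.Chars.strip x.toList) ['#','#',' '] = false :=
        Bool.eq_false_iff.mpr hpc
      have hp' : PySem.Str.startswith (PySem.Str.strip x) "## " = false := by simpa using hpc'
      have hfi : fi (x :: t) = fi t + 1 := by simp [fi, List.findIdx_cons, hpc']
      rw [bFind.eq_def]
      simp only []
      rw [if_neg (by rw [hp']; exact Bool.false_ne_true), ih, hfi]
      rcases Nat.lt_or_ge (fi t) t.length with hl | hl
      · rw [if_pos hl, if_pos (by simp only [List.length_cons]; omega)]
        push_cast; ring
      · rw [if_neg (Nat.not_lt.mpr hl), if_neg (by simp only [List.length_cons]; omega)]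

theorem aGo_eq (xs : List String) (d : Int) :
    ∀ (k : Int) (name : String) (intro : List String),
    aGo (PySem.List.enumerate xs k) name intro d =
      ((bLoop (xs.take (fi xs)) name intro).1,
       (bLoop (xs.take (fi xs)) name intro).2,
       if fi xs < xs.length then k + (fi xs : Int) else d) := by
  induction xs with
  | nil => intro k name intro; simp [aGo, bLoop, PySem.List.enumerate_nil, fi]
  | cons x t ih =>
    intro k name intro
    rw [PySem.List.enumerate_cons]
    by_cases hpc : PySem.Chars.startswith (PySem.Chars.strip x.toList) ['#','#',' '] = true
    · have hp : PySem.Str.startswith (PySem.Str.strip x) "## " = true := by simpa using hpc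
      have hfi0 : fi (x :: t) = 0 := by simp [fi, List.findIdx_cons, hpc]
      have hne : PySem.Str.strip x ≠ "" := by
        intro he; rw [he] at hp; exact absurd hp (by decide)
      have hnh : PySem.Str.startswith (PySem.Str.strip x) "# " = false := by
        simpa using hh_not_h hpc
      rw [aGo.eq_def]
      simp only []
      rw [if_neg hne, if_neg (by rw [hnh]; simp), if_pos hp, hfi0, List.take_zero]
      simp [bLoop]
    · have hpc' : PySem.Chars.startswith (PySem.Chars.strip x.toList) ['#','#',' '] = false :=
        Bool.eq_false_iff.mpr hpc
      have hp' : PySem.Str.startswith (PySem.Str.strip x) "## " = false := by simpa using hpc'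
      have hfi : fi (x :: t) = fi t + 1 := by simp [fi, List.findIdx_cons, hpc']
      have hidx : (if fi (x :: t) < (x :: t).length then k + (fi (x :: t) : Int) else d)
          = (if fi t < t.length then (k + 1) + (fi t : Int) else d) := by
        rw [hfi]
        rcases Nat.lt_or_ge (fi t) t.length with hl | hl
        · rw [if_pos hl, if_pos (by simp only [List.length_cons]; omega)]
          push_cast; ring
        · rw [if_neg (Nat.not_lt.mpr hl), if_neg (by simp only [List.length_cons]; omega)]
      rw [hidx, hfi, List.take_succ_cons, aGo.eq_def, bLoop.eq_def]
      simp only []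
      by_cases h1 : PySem.Str.strip x = ""
      · rw [if_pos h1, if_pos h1, ih]
      · rw [if_neg h1, if_neg h1]
        by_cases h2 : (PySem.Str.startswith (PySem.Str.strip x) "# " && (name == "")) = true
        · have h2b : ((name == "") && PySem.Str.startswith (PySem.Str.strip x) "# ") = true := by
            rw [Bool.and_comm]; exact h2
          rw [if_pos h2, if_pos h2b, ih]
        · have h2b : ¬ (((name == "") && PySem.Str.startswith (PySem.Str.strip x) "# ") = true) := by
            rw [Bool.and_comm]; exact h2
          rw [if_neg h2, if_neg (by rw [hp']; exact Bool.false_ne_true), if_neg h2b, ih]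

theorem ports_agree (lines : List String) :
    split_resume_markdown_py lines = split_resume_markdown_py_alt lines := by
  unfold split_resume_markdown_py split_resume_markdown_py_alt
  rw [aGo_eq, bFind_eq]
  have hle := fi_le lines
  rcases Nat.lt_or_ge (fi lines) lines.length with hl | hl
  · rw [if_pos hl]
    simp only [zero_add, PySem.List.slice_to_natCast]
  · have hfl : fi lines = lines.length := le_antisymm hle hl
    rw [if_neg (Nat.not_lt.mpr hl), hfl]
    simp only [PySem.List.slice_to_natCast, List.take_length]

-- ===== VERDICT (by name: the statement is the Claim_ definition above) =====
theorem split_resume_markdown_py_spec : Claim_equal_split_resume_markdown_py := by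
  intro lines _
  unfold Spec_split_resume_markdown_py
  exact ports_agree lines
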